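-- pv_equiv track=rewrite | github.com/vkmark/vkmark | src/gen_format_map.py | vk_fmt_to_hpp
-- ===== SOURCE A (Python) =====
-- def vk_fmt_to_hpp(fmt):
--     fmt = fmt.replace("VK_FORMAT_", "")
--     ret = ""
--     last_was_alpha = False
--     for c in fmt:
--         ret += c.lower() if last_was_alpha else c
--         last_was_alpha = c.isalpha()
--     return ret.replace("_", "")
-- ===== SOURCE B (Python) =====
-- def vk_fmt_to_hpp(fmt):
--     fmt = fmt.replace("VK_FORMAT_", "")
--     parts = []
--     i = 0
--     n = len(fmt)
--     while i < n:
--         if fmt[i].isalpha():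
--             j = i + 1
--             while j < n and fmt[j].isalpha():
--                 j += 1
--             parts.append(fmt[i] + fmt[i + 1:j].lower())
--             i = j
--         else:
--             parts.append(fmt[i])
--             i += 1
--     return "".join(parts).replace("_", "")
-- ===== Notes on version B (the rewrite author's own statement) =====
-- stated objective: alternative
-- what changed: B scans maximal alphabetic runs (keep first char, lowercase the rest of the run) and joins the pieces, instead of A's per-character loop carrying a last_was_alpha flag.
import Mathlib
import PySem

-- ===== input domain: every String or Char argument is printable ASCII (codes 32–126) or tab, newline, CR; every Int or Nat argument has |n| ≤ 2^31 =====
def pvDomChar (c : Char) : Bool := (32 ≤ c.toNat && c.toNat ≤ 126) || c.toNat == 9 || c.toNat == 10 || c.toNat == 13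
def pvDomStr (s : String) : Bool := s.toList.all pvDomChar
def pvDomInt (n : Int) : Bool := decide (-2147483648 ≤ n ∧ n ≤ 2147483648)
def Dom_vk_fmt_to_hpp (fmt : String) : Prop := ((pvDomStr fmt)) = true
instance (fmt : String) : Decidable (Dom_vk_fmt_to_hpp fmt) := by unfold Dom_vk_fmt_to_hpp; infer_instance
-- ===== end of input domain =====

-- B replaces A's per-character loop with a flag by a scan over maximal alphabetic runs; same O(n) cost, different decomposition.

-- ===== PORT A =====
-- per-character loop: ret += c.lower() if last_was_alpha else c; last_was_alpha = c.isalpha()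
-- (character list accumulator, turned into a String at the end; Chars.isalpha/lowerChar are Python's semantics on the ASCII domain)
def vk_fmt_to_hpp (fmt : String) : String :=
  let fmt' := PySem.Str.replace fmt "VK_FORMAT_" ""
  let st := fmt'.toList.foldl
    (fun (st : List Char × Bool) c =>
      (st.1 ++ [if st.2 then PySem.Chars.lowerChar c else c], PySem.Chars.isalpha c))
    ([], false)
  PySem.Str.replace (String.mk st.1) "_" ""

-- ===== PORT B =====
-- B's outer while loop: each step consumes one maximal alphabetic run (first char kept,
-- rest lowercased) or a single non-alphabetic char; the inner 'while j < n' scan is the takeWhile/dropWhile split.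
def altGo (l : List Char) : List Char :=
  match l with
  | [] => []
  | c :: rest =>
    if PySem.Chars.isalpha c then
      (c :: (rest.takeWhile PySem.Chars.isalpha).map PySem.Chars.lowerChar)
        ++ altGo (rest.dropWhile PySem.Chars.isalpha)
    else
      c :: altGo rest
termination_by l.length
decreasing_by
  · simpa using Nat.lt_succ_of_le (rest.length_dropWhile_le _)
  · simp

def vk_fmt_to_hpp_alt (fmt : String) : String :=
  let fmt' := PySem.Str.replace fmt "VK_FORMAT_" ""
  PySem.Str.replace (String.mk (altGo fmt'.toList)) "_" ""

-- ===== PRECONDITION & SPEC =====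
def Spec_vk_fmt_to_hpp (fmt : String) (out : String) : Prop := out = vk_fmt_to_hpp_alt fmt
instance (fmt : String) (out : String) : Decidable (Spec_vk_fmt_to_hpp fmt out) := by unfold Spec_vk_fmt_to_hpp; infer_instance

-- ===== CLAIM (what is proved, stated in full; the proofs are below) =====
def Claim_equal_vk_fmt_to_hpp : Prop := ∀ (fmt : String), Dom_vk_fmt_to_hpp fmt → Spec_vk_fmt_to_hpp fmt (vk_fmt_to_hpp fmt)

-- ===== LEMMAS AND PROOFS =====

-- A's loop body as a pure function of the incoming flag
def aGo (b : Bool) (l : List Char) : List Char :=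
  match l with
  | [] => []
  | c :: rest => (if b then PySem.Chars.lowerChar c else c) :: aGo (PySem.Chars.isalpha c) rest

theorem foldl_eq_aGo (l : List Char) (acc : List Char) (b : Bool) :
    (l.foldl (fun (st : List Char × Bool) c =>
      (st.1 ++ [if st.2 then PySem.Chars.lowerChar c else c], PySem.Chars.isalpha c)) (acc, b)).1
      = acc ++ aGo b l := by
  induction l generalizing acc b with
  | nil => simp [aGo]
  | cons c rest ih => simp [aGo, ih, List.append_assoc]

theorem lower_nonalpha (d : Char) (h : PySem.Chars.isalpha d = false) :
    PySem.Chars.lowerChar d = d := by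
  rw [PySem.Chars.lowerChar]
  rw [PySem.Chars.isalpha, Bool.or_eq_false_iff] at h
  simp [h.1]

theorem aGo_true (rest : List Char) :
    aGo true rest
      = (rest.takeWhile PySem.Chars.isalpha).map PySem.Chars.lowerChar
        ++ aGo false (rest.dropWhile PySem.Chars.isalpha) := by
  induction rest with
  | nil => simp [aGo]
  | cons d r ih =>
    by_cases hd : PySem.Chars.isalpha d = true
    · simp [aGo, hd, ih]
    · simp only [Bool.not_eq_true] at hd
      simp [aGo, hd, lower_nonalpha d hd]

theorem aGo_false_eq_altGo (l : List Char) : aGo false l = altGo l := by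
  induction l using altGo.induct with
  | case1 => simp [aGo, altGo]
  | case2 c rest h ih =>
    rw [aGo, altGo]
    simp [h, aGo_true, ih]
  | case3 c rest h ih =>
    simp only [Bool.not_eq_true] at h
    rw [aGo, altGo]
    simp [h, ih]

-- ===== VERDICT (by name: the statement is the Claim_ definition above) =====
theorem vk_fmt_to_hpp_spec : Claim_equal_vk_fmt_to_hpp := by
  intro fmt _
  unfold Spec_vk_fmt_to_hpp vk_fmt_to_hpp vk_fmt_to_hpp_alt
  simp only [foldl_eq_aGo, List.nil_append, aGo_false_eq_altGo]
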